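-- pv_equiv track=rewrite | github.com/whoopnip/dero | testutils/byvars.py | _set_byvar_name
-- ===== SOURCE A (Python) =====
-- def _set_byvar_name(cols, byvar_name='byvar', i=0):
--
--     if i == 0:
--         # try original before adding index
--         new_byvar_name = byvar_name
--     else:
--         new_byvar_name = f'{byvar_name}{i}'
--
--     if new_byvar_name in cols:
--         i += 1
--         return _set_byvar_name(cols, byvar_name=byvar_name, i=i)
--     else:
--         return new_byvar_name
-- ===== SOURCE B (Python) =====
-- def _set_byvar_name(cols, byvar_name='byvar', i=0):
--     # Bounded forward scan: among the len(cols)+1 candidate names starting at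
--     # index i, at least one is unused (they are pairwise distinct), so the
--     # first free one is found without recursion; membership via a set.
--     colset = set(cols)
--     for j in range(i, i + len(cols) + 1):
--         new_name = byvar_name if j == 0 else f'{byvar_name}{j}'
--         if new_name not in colset:
--             return new_name
-- ===== Notes on version B (the rewrite author's own statement) =====
-- stated objective: alternative
-- what changed: Replaces unbounded tail recursion with one bounded for-loop over the pigeonhole-bounded candidate range [i, i+len(cols)], testing membership against a set built once.
import Mathlib
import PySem

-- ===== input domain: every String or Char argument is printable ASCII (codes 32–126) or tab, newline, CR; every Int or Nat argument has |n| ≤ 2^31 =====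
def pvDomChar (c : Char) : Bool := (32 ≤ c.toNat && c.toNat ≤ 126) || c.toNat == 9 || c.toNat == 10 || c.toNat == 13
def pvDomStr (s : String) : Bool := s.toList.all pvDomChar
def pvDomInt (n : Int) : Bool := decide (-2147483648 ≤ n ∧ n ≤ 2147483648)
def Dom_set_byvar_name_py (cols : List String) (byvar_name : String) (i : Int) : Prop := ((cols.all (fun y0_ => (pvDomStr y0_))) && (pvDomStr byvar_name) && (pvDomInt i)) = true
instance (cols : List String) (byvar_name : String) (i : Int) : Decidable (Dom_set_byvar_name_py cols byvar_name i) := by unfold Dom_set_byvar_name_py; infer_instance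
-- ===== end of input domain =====

-- B replaces A's unbounded tail recursion by one bounded scan of the candidate
-- range [i, i+len(cols)] against a set built once; return values are identical.

-- ===== helpers needed by port A's termination proof (cited by name in decreasing_by) =====

-- the candidate name Python builds for index j (bare name for j = 0)
def pvCand (byvar_name : String) (j : Int) : String :=
  if j = 0 then byvar_name else byvar_name ++ PySem.Int.toStr j

-- decimal digit list of a natural number (= Nat.toDigits 10, fuel-free form)
def pvRepr (n : Nat) : List Char :=
  if _h : n < 10 then [Nat.digitChar n]
  else pvRepr (n / 10) ++ [Nat.digitChar (n % 10)]
decreasing_by exact Nat.div_lt_self (by omega) (by omega)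

-- decimal decode used to show pvRepr (hence str) is injective
def pvDec (a : Nat) (l : List Char) : Nat :=
  l.foldl (fun a c => 10 * a + (c.toNat - 48)) a

theorem pvRepr_ne_nil (n : Nat) : pvRepr n ≠ [] := by
  rw [pvRepr]; split <;> simp

theorem pvDec_repr (n : Nat) : ∀ a : Nat, pvDec a (pvRepr n) = a * 10 ^ (pvRepr n).length + n := by
  induction n using Nat.strong_induction_on with
  | _ n IH =>
    intro a
    rw [pvRepr]
    split
    · next h =>
      have hd : (Nat.digitChar n).toNat = 48 + n := by interval_cases n <;> decide
      simp [pvDec, hd]; omega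
    · next h =>
      have hlt : n / 10 < n := Nat.div_lt_self (by omega) (by omega)
      have hd : (Nat.digitChar (n % 10)).toNat = 48 + n % 10 := by
        have := Nat.mod_lt n (show 0 < 10 by omega)
        interval_cases h : n % 10 <;> decide
      have hstep : pvDec a (pvRepr (n / 10) ++ [Nat.digitChar (n % 10)])
          = 10 * pvDec a (pvRepr (n / 10)) + ((Nat.digitChar (n % 10)).toNat - 48) := by
        simp [pvDec]
      rw [hstep, IH (n / 10) hlt a, hd, List.length_append, List.length_cons,
        List.length_nil, pow_succ, ← mul_assoc]
      have hdm : 10 * (n / 10) + n % 10 = n := Nat.div_add_mod n 10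
      omega

theorem pvRepr_inj {m n : Nat} (h : pvRepr m = pvRepr n) : m = n := by
  have h1 := pvDec_repr m 0
  have h2 := pvDec_repr n 0
  rw [h] at h1
  omega

-- Nat.toDigitsCore equals the fuel-free pvRepr when the fuel suffices
theorem pvToDigitsCore_eq : ∀ (f n : Nat) (acc : List Char), n < f →
    Nat.toDigitsCore 10 f n acc = pvRepr n ++ acc := by
  intro f
  induction f with
  | zero => intro n acc h; omega
  | succ f IH =>
    intro n acc h
    rw [Nat.toDigitsCore, pvRepr]
    by_cases h10 : n < 10
    · have : n / 10 = 0 := Nat.div_eq_of_lt h10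
      simp [this, h10, Nat.mod_eq_of_lt h10]
    · have hne : ¬ n / 10 = 0 := by
        intro h0; exact h10 (Nat.lt_of_div_eq_zero (by omega) h0)
      have hlt : n / 10 < f := by
        have := Nat.div_lt_self (show 0 < n by omega) (show 1 < 10 by omega)
        omega
      simp only [h10, dite_false, if_neg hne]
      rw [IH (n / 10) _ hlt, List.append_assoc]
      simp

theorem pvToDigits_eq (n : Nat) : Nat.toDigits 10 n = pvRepr n :=
  by simpa using pvToDigitsCore_eq (n + 1) n [] (by omega)

theorem pvToChars_inj {a b : Int} (h : PySem.Int.toChars a = PySem.Int.toChars b) : a = b := by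
  have key : ∀ m k : Nat, pvRepr m ≠ '-' :: pvRepr k := by
    intro m k hmk
    have hm := pvDec_repr m 0
    rw [hmk] at hm
    have hk := pvDec_repr k 0
    have : pvDec 0 ('-' :: pvRepr k) = pvDec 0 (pvRepr k) := by
      simp [pvDec]
    rw [this] at hm
    have hmk2 : m = k := by omega
    rw [hmk2] at hmk
    have := congrArg List.length hmk
    simp at this
  unfold PySem.Int.toChars at h
  simp only [pvToDigits_eq] at h
  split_ifs at h with h1 h2 h2
  · simp only [List.cons.injEq, true_and] at h
    have := pvRepr_inj h
    omega
  · exact absurd h.symm (key _ _)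
  · exact absurd h (key _ _)
  · have := pvRepr_inj h
    omega

theorem pvToStr_inj {a b : Int} (h : PySem.Int.toStr a = PySem.Int.toStr b) : a = b := by
  apply pvToChars_inj
  have h2 := congrArg String.toList h
  simpa only [PySem.Int.toStr, String.toList_ofList] using h2

theorem pvToStr_toList_ne_nil (a : Int) : (PySem.Int.toStr a).toList ≠ [] := by
  simp only [PySem.Int.toStr, String.toList_ofList, PySem.Int.toChars, pvToDigits_eq]
  split_ifs
  · simp
  · simp [pvRepr_ne_nil]

theorem pvCand_inj (name : String) {j1 j2 : Int} (h : pvCand name j1 = pvCand name j2) :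
    j1 = j2 := by
  unfold pvCand at h
  split_ifs at h with h1 h2 h2
  · omega
  · have hl := congrArg String.toList h
    simp only [String.toList_append] at hl
    have hlen := congrArg List.length hl
    simp only [List.length_append] at hlen
    have hnil : (PySem.Int.toStr j2).toList = [] := by
      have : (PySem.Int.toStr j2).toList.length = 0 := by omega
      simpa [List.length_eq_zero_iff] using this
    exact absurd hnil (pvToStr_toList_ne_nil j2)
  · have hl := congrArg String.toList h
    simp only [String.toList_append] at hl
    have hlen := congrArg List.length hl
    simp only [List.length_append] at hlen
    have hnil : (PySem.Int.toStr j1).toList = [] := by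
      have : (PySem.Int.toStr j1).toList.length = 0 := by omega
      simpa [List.length_eq_zero_iff] using this
    exact absurd hnil (pvToStr_toList_ne_nil j1)
  · have hts : PySem.Int.toStr j1 = PySem.Int.toStr j2 := by
      have := congrArg String.toList h
      simp only [String.toList_append, List.append_cancel_left_eq] at this
      exact String.toList_inj.mp this
    exact pvToStr_inj hts

-- pigeonhole: among the cols.length + 1 distinct candidates starting at i, one is unused
theorem pvFree_ex_bdd (cols : List String) (name : String) (i : Int) :
    ∃ k : Nat, pvCand name (i + (k : Int)) ∉ cols ∧ k ≤ cols.length := by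
  by_contra hcon
  push Not at hcon
  have hall : ∀ k : Nat, k < cols.length + 1 → pvCand name (i + (k : Int)) ∈ cols := by
    intro k hk
    by_contra hnot
    exact absurd (hcon k hnot) (by omega)
  set l := (List.range (cols.length + 1)).map (fun k : Nat => pvCand name (i + (k : Int))) with hl
  have hnd : l.Nodup := by
    refine List.Nodup.map ?_ (List.nodup_range)
    intro k1 k2 hk
    have := pvCand_inj name hk
    omega
  have hsub : l ⊆ cols := by
    intro x hx
    simp only [hl, List.mem_map, List.mem_range] at hx
    obtain ⟨k, hk, rfl⟩ := hx
    exact hall k hk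
  have := (hnd.subperm hsub).length_le
  simp [hl] at this

theorem pvFree_ex (cols : List String) (name : String) (i : Int) :
    ∃ k : Nat, pvCand name (i + (k : Int)) ∉ cols := by
  obtain ⟨k, hk, _⟩ := pvFree_ex_bdd cols name i
  exact ⟨k, hk⟩

-- distance from i to the first unused candidate index
def pvGap (cols : List String) (name : String) (i : Int) : Nat :=
  Nat.find (pvFree_ex cols name i)

theorem pvGap_succ_eq (cols : List String) (name : String) (i : Int)
    (h : pvCand name i ∈ cols) : pvGap cols name i = pvGap cols name (i + 1) + 1 := by
  have hspec := Nat.find_spec (pvFree_ex cols name i)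
  have hspec1 := Nat.find_spec (pvFree_ex cols name (i + 1))
  have hne : pvGap cols name i ≠ 0 := by
    intro h0
    unfold pvGap at h0
    rw [h0] at hspec
    simp at hspec
    exact hspec h
  have hle : pvGap cols name i ≤ pvGap cols name (i + 1) + 1 := by
    apply Nat.find_le
    have : i + ((pvGap cols name (i + 1) + 1 : Nat) : Int)
        = i + 1 + ((pvGap cols name (i + 1) : Nat) : Int) := by push_cast; ring
    rw [this]
    exact hspec1
  have hge : pvGap cols name (i + 1) ≤ pvGap cols name i - 1 := by
    apply Nat.find_le
    have : i + 1 + ((pvGap cols name i - 1 : Nat) : Int)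
        = i + ((pvGap cols name i : Nat) : Int) := by
      have h1 : 1 ≤ pvGap cols name i := Nat.one_le_iff_ne_zero.mpr hne
      push_cast [h1]
      ring
    rw [this]
    exact hspec
  omega

theorem pvGap_succ_lt (cols : List String) (name : String) (i : Int)
    (h : pvCand name i ∈ cols) : pvGap cols name (i + 1) < pvGap cols name i := by
  rw [pvGap_succ_eq cols name i h]; omega

-- ===== PORT A =====
def set_byvar_name_py (cols : List String) (byvar_name : String) (i : Int) : String :=
  let new_byvar_name := if i = 0 then byvar_name else byvar_name ++ PySem.Int.toStr i
  if new_byvar_name ∈ cols then set_byvar_name_py cols byvar_name (i + 1)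
  else new_byvar_name
termination_by pvGap cols byvar_name i
decreasing_by
  exact pvGap_succ_lt cols byvar_name i (by simpa [pvCand] using ‹_›)

-- ===== PORT B =====
-- the for-loop of Source B over the precomputed candidate index range; [] is Python's
-- fall-through (return None), unreachable because a free name exists in the range
def pvBLoop (colset : List String) (byvar_name : String) : List Int → String
  | [] => ""
  | j :: rest =>
    let new_name := if j = 0 then byvar_name else byvar_name ++ PySem.Int.toStr j
    if new_name ∈ colset then pvBLoop colset byvar_name rest else new_name

def set_byvar_name_py_alt (cols : List String) (byvar_name : String) (i : Int) : String :=
  pvBLoop (PySem.Set.ofList cols) byvar_name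
    (PySem.List.pyRange i (i + (cols.length : Int) + 1) 1)

-- ===== PRECONDITION & SPEC =====
def Spec_set_byvar_name_py (cols : List String) (byvar_name : String) (i : Int) (out : String) : Prop := out = set_byvar_name_py_alt cols byvar_name i
instance (cols : List String) (byvar_name : String) (i : Int) (out : String) : Decidable (Spec_set_byvar_name_py cols byvar_name i out) := by unfold Spec_set_byvar_name_py; infer_instance

-- ===== CLAIM (what is proved, stated in full; the proofs are below) =====
def Claim_equal_set_byvar_name_py : Prop := ∀ (cols : List String) (byvar_name : String) (i : Int), Dom_set_byvar_name_py cols byvar_name i → Spec_set_byvar_name_py cols byvar_name i (set_byvar_name_py cols byvar_name i)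

-- ===== LEMMAS AND PROOFS =====

theorem pvGap_le (cols : List String) (name : String) (i : Int) :
    pvGap cols name i ≤ cols.length := by
  obtain ⟨k, hk, hkle⟩ := pvFree_ex_bdd cols name i
  exact le_trans (Nat.find_le hk) hkle

theorem pvA_eq (cols : List String) (name : String) :
    ∀ (g : Nat) (i : Int), pvGap cols name i = g →
      set_byvar_name_py cols name i = pvCand name (i + (g : Int)) := by
  intro g
  induction g using Nat.strong_induction_on with
  | _ g IH =>
    intro i hg
    rw [set_byvar_name_py]
    by_cases h : pvCand name i ∈ cols
    · have hmem : (if i = 0 then name else name ++ PySem.Int.toStr i) ∈ cols := by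
        simpa [pvCand] using h
      simp only [hmem, if_pos]
      have heq := pvGap_succ_eq cols name i h
      rw [hg] at heq
      have hlt : pvGap cols name (i + 1) < g := by omega
      rw [IH (pvGap cols name (i + 1)) hlt (i + 1) rfl]
      congr 1
      push_cast [show g = pvGap cols name (i+1) + 1 by omega]
      ring
    · have hmem : ¬ (if i = 0 then name else name ++ PySem.Int.toStr i) ∈ cols := by
        simpa [pvCand] using h
      simp only [hmem, if_neg, not_false_iff]
      have hg0 : pvGap cols name i = 0 := by
        apply Nat.find_eq_zero (pvFree_ex cols name i) |>.mpr
        simpa using h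
      rw [hg0] at hg
      subst hg
      simp [pvCand]

theorem pvB_eq (cols : List String) (name : String) :
    ∀ (g : Nat) (i b : Int), pvGap cols name i = g → i + (g : Int) < b →
      pvBLoop (PySem.Set.ofList cols) name (PySem.List.pyRange i b 1) = pvCand name (i + (g : Int)) := by
  intro g
  induction g using Nat.strong_induction_on with
  | _ g IH =>
    intro i b hg hb
    have hib : i < b := by omega
    rw [PySem.List.pyRange_one_cons hib, pvBLoop]
    by_cases h : pvCand name i ∈ cols
    · have hmem : (if i = 0 then name else name ++ PySem.Int.toStr i) ∈ PySem.Set.ofList cols := by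
        rw [PySem.Set.mem_ofList]
        simpa [pvCand] using h
      simp only [hmem, if_pos]
      have heq := pvGap_succ_eq cols name i h
      rw [hg] at heq
      have hlt : pvGap cols name (i + 1) < g := by omega
      have harg : i + 1 + ((pvGap cols name (i+1) : Nat) : Int) = i + (g : Int) := by
        push_cast [show g = pvGap cols name (i+1) + 1 by omega]
        ring
      rw [IH (pvGap cols name (i + 1)) hlt (i + 1) b rfl (by omega), harg]
    · have hmem : ¬ (if i = 0 then name else name ++ PySem.Int.toStr i) ∈ PySem.Set.ofList cols := by
        rw [PySem.Set.mem_ofList]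
        simpa [pvCand] using h
      simp only [hmem, if_neg, not_false_iff]
      have hg0 : pvGap cols name i = 0 := by
        apply Nat.find_eq_zero (pvFree_ex cols name i) |>.mpr
        simpa using h
      rw [hg0] at hg
      subst hg
      simp [pvCand]

-- ===== VERDICT (by name: the statement is the Claim_ definition above) =====
theorem set_byvar_name_py_spec : Claim_equal_set_byvar_name_py := by
  intro cols byvar_name i _
  unfold Spec_set_byvar_name_py set_byvar_name_py_alt
  rw [pvA_eq cols byvar_name (pvGap cols byvar_name i) i rfl,
      pvB_eq cols byvar_name (pvGap cols byvar_name i) i (i + (cols.length : Int) + 1) rfl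
        (by have := pvGap_le cols byvar_name i; omega)]
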